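-- pv_equiv track=rewrite | github.com/randomRedMage/random_red_mage_py_solitaire | src/solitaire/modes/bowling_scoring.py | calculate_frame_totals
-- ===== SOURCE A (Python) =====
-- from typing import List, Optional, Sequence
--
-- def calculate_frame_totals(rolls: Sequence[int]) -> List[Optional[int]]:
--     """Return cumulative frame totals following ten-pin bowling rules."""
--
--     totals: List[Optional[int]] = [None] * 10
--     cumulative = 0
--     roll_index = 0
--
--     for frame_index in range(10):
--         if roll_index >= len(rolls):
--             break
--
--         first = rolls[roll_index]
--
--         if frame_index < 9:
--             if first == 10:
--                 if roll_index + 2 >= len(rolls):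
--                     break
--                 cumulative += 10 + rolls[roll_index + 1] + rolls[roll_index + 2]
--                 totals[frame_index] = cumulative
--                 roll_index += 1
--                 continue
--
--             if roll_index + 1 >= len(rolls):
--                 break
--
--             second = rolls[roll_index + 1]
--             if first + second == 10:
--                 if roll_index + 2 >= len(rolls):
--                     break
--                 cumulative += 10 + rolls[roll_index + 2]
--             else:
--                 cumulative += first + second
--
--             totals[frame_index] = cumulative
--             roll_index += 2
--             continue
--
--         if roll_index + 1 >= len(rolls):
--             break
--
--         second = rolls[roll_index + 1]
--         if first == 10:
--             if roll_index + 2 >= len(rolls):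
--                 break
--             third = rolls[roll_index + 2]
--             cumulative += 10 + second + third
--         elif first + second == 10:
--             if roll_index + 2 >= len(rolls):
--                 break
--             third = rolls[roll_index + 2]
--             cumulative += 10 + third
--         else:
--             cumulative += first + second
--
--         totals[frame_index] = cumulative
--         break
--
--     return totals
-- ===== SOURCE B (Python) =====
-- from typing import List, Optional, Sequence
--
-- def calculate_frame_totals(rolls: Sequence[int]) -> List[Optional[int]]:
--     """Return cumulative frame totals following ten-pin bowling rules."""
--     n = len(rolls)
--     # Pass 1: collect the score of each completed frame.  A strike or spare
--     # scores the sum of three rolls, an open frame the sum of two; stop at the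
--     # first frame whose required rolls are missing.
--     scores: List[int] = []
--     i = 0
--     for _ in range(10):
--         if i + 1 >= n:
--             break
--         a, b = rolls[i], rolls[i + 1]
--         if a == 10 or a + b == 10:
--             if i + 2 >= n:
--                 break
--             scores.append(a + b + rolls[i + 2])
--             i += 1 if a == 10 else 2
--         else:
--             scores.append(a + b)
--             i += 2
--     # Pass 2: prefix-sum into the length-10 result.
--     totals: List[Optional[int]] = [None] * 10
--     c = 0
--     for j, s in enumerate(scores):
--         c += s
--         totals[j] = c
--     return totals
-- ===== Notes on version B (the rewrite author's own statement) =====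
-- stated objective: simpler
-- what changed: Replaces A's single 10-branch loop that threads totals/cumulative/roll_index and special-cases the 10th frame with two passes: a scoring pass that collects completed-frame scores (strike/spare = sum of three rolls, open = sum of two, one unified rule for all frames), then a prefix-sum pass into the length-10 result.
import Mathlib
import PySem

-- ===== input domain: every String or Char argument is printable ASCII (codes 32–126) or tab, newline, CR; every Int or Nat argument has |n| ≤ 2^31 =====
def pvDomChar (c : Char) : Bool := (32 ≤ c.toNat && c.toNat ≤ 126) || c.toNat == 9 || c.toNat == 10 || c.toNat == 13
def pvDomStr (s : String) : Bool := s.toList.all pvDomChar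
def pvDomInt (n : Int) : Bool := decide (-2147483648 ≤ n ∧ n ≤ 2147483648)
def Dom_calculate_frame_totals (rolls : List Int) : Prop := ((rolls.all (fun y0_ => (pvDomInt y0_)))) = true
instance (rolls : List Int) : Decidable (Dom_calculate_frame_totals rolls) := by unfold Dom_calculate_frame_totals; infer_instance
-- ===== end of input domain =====

-- B splits A's single 10-branch frame loop into two passes: one pass collecting per-frame
-- scores (strike/spare = sum of three rolls, open = sum of two, unifying the 10th frame),
-- then a prefix-sum pass into the length-10 result.  Objective: simpler decomposition.

-- ===== PORT A =====
-- Literal port of A's frame loop; `break` returns the current totals list.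
def aLoop (rolls : List Int) (frame_index : Nat) (totals : List (Option Int))
    (cumulative : Int) (roll_index : Nat) : List (Option Int) :=
  if _h10 : 10 ≤ frame_index then totals
  else if roll_index ≥ rolls.length then totals
  else
    let first := rolls.getD roll_index 0
    if frame_index < 9 then
      if first = 10 then
        if roll_index + 2 ≥ rolls.length then totals
        else
          let c := cumulative + (10 + rolls.getD (roll_index + 1) 0 + rolls.getD (roll_index + 2) 0)
          aLoop rolls (frame_index + 1) (totals.set frame_index (some c)) c (roll_index + 1)
      else
        if roll_index + 1 ≥ rolls.length then totals
        else
          let second := rolls.getD (roll_index + 1) 0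
          if first + second = 10 then
            if roll_index + 2 ≥ rolls.length then totals
            else
              let c := cumulative + (10 + rolls.getD (roll_index + 2) 0)
              aLoop rolls (frame_index + 1) (totals.set frame_index (some c)) c (roll_index + 2)
          else
            let c := cumulative + (first + second)
            aLoop rolls (frame_index + 1) (totals.set frame_index (some c)) c (roll_index + 2)
    else
      -- frame_index = 9: last frame, then break
      if roll_index + 1 ≥ rolls.length then totals
      else
        let second := rolls.getD (roll_index + 1) 0
        if first = 10 then
          if roll_index + 2 ≥ rolls.length then totals
          else
            let third := rolls.getD (roll_index + 2) 0
            totals.set frame_index (some (cumulative + (10 + second + third)))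
        else if first + second = 10 then
          if roll_index + 2 ≥ rolls.length then totals
          else
            let third := rolls.getD (roll_index + 2) 0
            totals.set frame_index (some (cumulative + (10 + third)))
        else
          totals.set frame_index (some (cumulative + (first + second)))
  termination_by 10 - frame_index
  decreasing_by all_goals omega

def calculate_frame_totals (rolls : List Int) : List (Option Int) :=
  aLoop rolls 0 (List.replicate 10 none) 0 0

-- ===== PORT B =====
-- Pass 1: per-frame scores, at most `k` more frames, stopping when rolls run out.
def bScores (rolls : List Int) (k : Nat) (i : Nat) : List Int :=
  match k with
  | 0 => []
  | k + 1 =>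
    if i + 1 ≥ rolls.length then []
    else
      let a := rolls.getD i 0
      let b := rolls.getD (i + 1) 0
      if a = 10 ∨ a + b = 10 then
        if i + 2 ≥ rolls.length then []
        else (a + b + rolls.getD (i + 2) 0) :: bScores rolls k (if a = 10 then i + 1 else i + 2)
      else (a + b) :: bScores rolls k (i + 2)

-- Pass 2: prefix-sum the scores into [None]*10 (fold over enumerate, as in Source B).
def calculate_frame_totals_alt (rolls : List Int) : List (Option Int) :=
  (List.foldl (fun (st : List (Option Int) × Int) (p : Int × Int) =>
      (st.1.set p.1.toNat (some (st.2 + p.2)), st.2 + p.2))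
    (List.replicate 10 (none : Option Int), (0 : Int)) (PySem.List.enumerate (bScores rolls 10 0))).1

-- ===== PRECONDITION & SPEC =====
def Spec_calculate_frame_totals (rolls : List Int) (out : List (Option Int)) : Prop := out = calculate_frame_totals_alt rolls
instance (rolls : List Int) (out : List (Option Int)) : Decidable (Spec_calculate_frame_totals rolls out) := by unfold Spec_calculate_frame_totals; infer_instance

-- ===== CLAIM (what is proved, stated in full; the proofs are below) =====
def Claim_equal_calculate_frame_totals : Prop := ∀ (rolls : List Int), Dom_calculate_frame_totals rolls → Spec_calculate_frame_totals rolls (calculate_frame_totals rolls)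

-- ===== LEMMAS AND PROOFS =====

-- Proof-side recursive form of B's second pass.
def bFill (totals : List (Option Int)) (c : Int) (j : Nat) : List Int → List (Option Int)
  | [] => totals
  | s :: rest => bFill (totals.set j (some (c + s))) (c + s) (j + 1) rest

theorem foldl_enum_eq_bFill (scores : List Int) : ∀ (totals : List (Option Int)) (c : Int) (j : Nat),
    (List.foldl (fun (st : List (Option Int) × Int) (p : Int × Int) =>
        (st.1.set p.1.toNat (some (st.2 + p.2)), st.2 + p.2))
      (totals, c) (PySem.List.enumerate scores (j : Int))).1 = bFill totals c j scores := by
  induction scores with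
  | nil => intro totals c j; simp [PySem.List.enumerate_nil, bFill]
  | cons s rest ih =>
    intro totals c j
    rw [PySem.List.enumerate_cons]
    simp only [List.foldl_cons, bFill]
    have : ((j : Int) + 1) = ((j + 1 : Nat) : Int) := by push_cast; ring
    rw [this, ih]
    simp

theorem aLoop_eq_bFill (rolls : List Int) : ∀ (k i : Nat) (totals : List (Option Int)) (c : Int),
    k ≤ 10 → aLoop rolls (10 - k) totals c i = bFill totals c (10 - k) (bScores rolls k i) := by
  intro k
  induction k with
  | zero =>
    intro i totals c _
    rw [aLoop, bScores]
    simp [bFill]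
  | succ k ih =>
    intro i totals c hk
    have hfr : ¬ 10 ≤ 10 - (k + 1) := by omega
    rw [aLoop, bScores]
    rw [dif_neg hfr]
    by_cases hlen : i + 1 ≥ rolls.length
    · -- B breaks; A breaks in every branch (all live branches return `totals`)
      rw [if_pos hlen]
      show _ = bFill totals c _ []
      rw [bFill]
      split_ifs <;> first | rfl | omega | (show ite _ totals totals = totals; split <;> rfl)
    · have hi : ¬ i ≥ rolls.length := by omega
      rw [if_neg hlen, if_neg hi]
      set a := rolls.getD i 0 with ha
      set b := rolls.getD (i + 1) 0 with hb
      by_cases h9 : 10 - (k + 1) < 9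
      · -- not the last frame, so k ≥ 1
        have hsucc : 10 - (k + 1) + 1 = 10 - k := by omega
        rw [if_pos h9]
        by_cases hstrike : a = 10
        · rw [if_pos hstrike, if_pos (Or.inl hstrike)]
          by_cases h2 : i + 2 ≥ rolls.length
          · rw [if_pos h2, if_pos h2, bFill]
          · rw [if_neg h2, if_neg h2, if_pos hstrike, bFill, hsucc, ih _ _ _ (by omega)]
            have hcs : c + (10 + b + rolls.getD (i + 2) 0) = c + (a + b + rolls.getD (i + 2) 0) := by
              rw [hstrike]
            rw [hcs]
        · rw [if_neg hstrike, if_neg hlen]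
          by_cases hspare : a + b = 10
          · rw [if_pos hspare, if_pos (Or.inr hspare)]
            by_cases h2 : i + 2 ≥ rolls.length
            · rw [if_pos h2, if_pos h2, bFill]
            · rw [if_neg h2, if_neg h2, if_neg hstrike, bFill, hsucc, ih _ _ _ (by omega)]
              have hcs : c + (10 + rolls.getD (i + 2) 0) = c + (a + b + rolls.getD (i + 2) 0) := by
                rw [← hspare]
              rw [hcs]
          · have hor : ¬ (a = 10 ∨ a + b = 10) := by tauto
            rw [if_neg hspare, if_neg hor, bFill, hsucc, ih _ _ _ (by omega)]
      · -- last frame: 10 - (k+1) = 9, so k = 0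
        have hk0 : k = 0 := by omega
        subst hk0
        rw [if_neg h9, if_neg hlen]
        by_cases hstrike : a = 10
        · rw [if_pos hstrike, if_pos (Or.inl hstrike)]
          by_cases h2 : i + 2 ≥ rolls.length
          · rw [if_pos h2, if_pos h2, bFill]
          · rw [if_neg h2, if_neg h2, bScores, bFill, bFill]
            show totals.set (10 - (0 + 1)) (some (c + (10 + b + rolls.getD (i + 2) 0))) =
              totals.set (10 - (0 + 1)) (some (c + (a + b + rolls.getD (i + 2) 0)))
            rw [hstrike]
        · rw [if_neg hstrike]
          by_cases hspare : a + b = 10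
          · rw [if_pos hspare, if_pos (Or.inr hspare)]
            by_cases h2 : i + 2 ≥ rolls.length
            · rw [if_pos h2, if_pos h2, bFill]
            · rw [if_neg h2, if_neg h2, bScores, bFill, bFill]
              show totals.set (10 - (0 + 1)) (some (c + (10 + rolls.getD (i + 2) 0))) =
                totals.set (10 - (0 + 1)) (some (c + (a + b + rolls.getD (i + 2) 0)))
              rw [← hspare]
          · have hor : ¬ (a = 10 ∨ a + b = 10) := by tauto
            rw [if_neg hspare, if_neg hor, bScores, bFill, bFill]

-- ===== VERDICT (by name: the statement is the Claim_ definition above) =====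
theorem calculate_frame_totals_spec : Claim_equal_calculate_frame_totals := by
  intro rolls _
  unfold Spec_calculate_frame_totals
  have h1 := foldl_enum_eq_bFill (bScores rolls 10 0) (List.replicate 10 none) 0 0
  simp only [Nat.cast_zero] at h1
  have h2 := aLoop_eq_bFill rolls 10 0 (List.replicate 10 none) 0 (by omega)
  rw [calculate_frame_totals, calculate_frame_totals_alt, h1]
  simpa using h2
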